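-- pv_equiv track=rewrite | github.com/kartikey-singh/Orthographic-Languages-Similarity-Measurements | Porter Stemmer/PorterStemmer.py | step4
-- ===== SOURCE A (Python) =====
-- vowels = ['a', 'e', 'i', 'o', 'u']
--
-- def find(word):
--     '''
--     Finding m
--     '''
--     cvc_str = cvc_pattern(word)
--     groups = 0
--     flag = 1
--     #flag is 1 until a vowel is found
--     vowel_found = 0
--     for letter in cvc_str:
--         if letter is 'v':
--             flag = 0
--             vowel_found = 1
--         elif not flag:
--             if vowel_found:
--                 groups += 1
--                 vowel_found = 0
--     return groups
--
-- def cvc_pattern(word):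
--     cvc_str = []
--     for index, letter in enumerate(word):
--         if letter in vowels:
--             cvc_str.append('v')
--         elif index > 0 and cvc_str[index-1] == 'c' and letter == 'y':
--             cvc_str.append('v')
--         else:
--             cvc_str.append('c')
--
--     return cvc_str
--
-- def step4(word):
--     suffixes = ['al', 'ance', 'ence', 'er', 'ic', 'able', 'ible', 'ant', 'ement', 'ment', 'ent', 'ou',
--                 'ism', 'ate', 'iti', 'ous', 'ive', 'ize']
--     for index, suffix in enumerate(suffixes):
--         if word.endswith(suffix):
--             if find(word[:-len(suffix)]) > 1:
--                 return word[:-len(suffix)]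
--             else:
--                 return word
--     if word.endswith('ion'):
--         temp_word = word[:-len('ion')]
--         if find(word[:-len('ion')]) > 1 and (temp_word[-1] == 's' or temp_word[-1] == 't'):
--             return word[:-len('ion')]
--     return word
-- ===== SOURCE B (Python) =====
-- SUFFIXES = ('al', 'ance', 'ence', 'er', 'ic', 'able', 'ible', 'ant', 'ement', 'ment', 'ent', 'ou',
--             'ism', 'ate', 'iti', 'ous', 'ive', 'ize')
-- VOWELS = set('aeiou')
--
-- def _measure(stem):
--     # Porter measure m in ONE pass: classify each letter while counting
--     # vowel-run -> consonant transitions, no intermediate pattern list.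
--     m = 0
--     prev_consonant = False
--     in_vowel_run = False
--     for ch in stem:
--         is_vowel = ch in VOWELS or (ch == 'y' and prev_consonant)
--         if is_vowel:
--             in_vowel_run = True
--         else:
--             if in_vowel_run:
--                 m += 1
--             in_vowel_run = False
--         prev_consonant = not is_vowel
--     return m
--
-- def step4(word):
--     suffix = next((s for s in SUFFIXES if word.endswith(s)), None)
--     if suffix is not None:
--         stem = word[:-len(suffix)]
--         return stem if _measure(stem) > 1 else word
--     if word.endswith('ion'):
--         stem = word[:-3]
--         if stem and stem[-1] in ('s', 't') and _measure(stem) > 1: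
--             return stem
--     return word
-- ===== Notes on version B (the rewrite author's own statement) =====
-- stated objective: alternative
-- what changed: The two-stage measure (cvc_pattern builds the full 'c'/'v' label list, which find then rescans counting groups) is replaced by a single fused pass that classifies each letter while counting vowel-run-to-consonant transitions, and the suffix loop is decomposed into find-the-suffix-first (next(...)) then one decision.
import Mathlib
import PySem

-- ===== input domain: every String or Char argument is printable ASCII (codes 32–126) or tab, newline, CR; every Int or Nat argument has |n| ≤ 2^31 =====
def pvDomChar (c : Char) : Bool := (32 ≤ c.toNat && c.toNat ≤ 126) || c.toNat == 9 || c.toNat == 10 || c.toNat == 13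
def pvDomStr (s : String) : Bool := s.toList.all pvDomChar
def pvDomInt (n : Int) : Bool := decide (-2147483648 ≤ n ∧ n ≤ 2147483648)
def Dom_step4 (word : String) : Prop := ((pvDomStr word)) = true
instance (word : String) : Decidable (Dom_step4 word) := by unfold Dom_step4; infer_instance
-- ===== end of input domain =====

-- B replaces A's two-stage pvMeasure (build the full 'c'/'v' pattern list, then rescan it
-- counting groups) with a single fused pass carrying the previous classification; same
-- return value everywhere (alternative decomposition, same asymptotic cost).

-- ===== PORT A =====
def pvVowels : List Char := ['a', 'e', 'i', 'o', 'u']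

-- cvc_pattern: builds the list of 'c'/'v' labels, reading back cvc_str[index-1] for the y-rule
def cvc_pattern (word : String) : List Char :=
  (PySem.List.enumerate word.toList 0).foldl (fun cvc_str p =>
    if p.2 ∈ pvVowels then cvc_str ++ ['v']
    else if p.1 > 0 ∧ PySem.List.pyGet? cvc_str (p.1 - 1) = some 'c' ∧ p.2 = 'y' then
      cvc_str ++ ['v']
    else cvc_str ++ ['c']) []

-- find's loop body; state = (groups, flag, vowel_found)
def findLoop (st : Int × Bool × Bool) (letter : Char) : Int × Bool × Bool :=
  if letter = 'v' then (st.1, false, true)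
  else if st.2.1 = false then
    (if st.2.2 then (st.1 + 1, st.2.1, false) else st)
  else st

def find (word : String) : Int :=
  ((cvc_pattern word).foldl findLoop (0, true, false)).1

def pvSuffixes : List String :=
  ["al", "ance", "ence", "er", "ic", "able", "ible", "ant", "ement", "ment", "ent", "ou",
   "ism", "ate", "iti", "ous", "ive", "ize"]

-- the for-loop over suffixes with its early returns
def step4Go (word : String) : List String → Option String
  | [] => none
  | suffix :: rest =>
    if PySem.Str.endswith word suffix then
      some (if find (PySem.Str.slice word none (some (-(PySem.Str.len suffix)))) > 1
            then PySem.Str.slice word none (some (-(PySem.Str.len suffix)))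
            else word)
    else step4Go word rest

def step4 (word : String) : String :=
  match step4Go word pvSuffixes with
  | some res => res
  | none =>
    if PySem.Str.endswith word "ion" then
      let temp_word := PySem.Str.slice word none (some (-(PySem.Str.len "ion")))
      -- Python's 'and' short-circuits: when find ≤ 1 the index temp_word[-1] is never taken,
      -- so comparing the Option to some 's'/'t' is exact (none compares unequal)
      if find temp_word > 1 ∧
          (PySem.Str.pyGet? temp_word (-1) = some 's' ∨ PySem.Str.pyGet? temp_word (-1) = some 't')
      then temp_word else word
    else word

-- ===== PORT B =====
def pvSuffixesB : List String :=
  ["al", "ance", "ence", "er", "ic", "able", "ible", "ant", "ement", "ment", "ent", "ou",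
   "ism", "ate", "iti", "ous", "ive", "ize"]

def pvVowelsB : PySem.Set Char := PySem.Set.ofList "aeiou".toList

-- _measure's loop body; state = (m, prev_consonant, in_vowel_run)
def pvMeasureLoop (st : Int × Bool × Bool) (ch : Char) : Int × Bool × Bool :=
  if PySem.Set.contains pvVowelsB ch || (ch == 'y' && st.2.1) then (st.1, false, true)
  else ((if st.2.2 then st.1 + 1 else st.1), true, false)

def pvMeasure (stem : String) : Int :=
  (stem.toList.foldl pvMeasureLoop (0, false, false)).1

-- next((s for s in SUFFIXES if word.endswith(s)), None)
def findSuffix (word : String) : List String → Option String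
  | [] => none
  | s :: rest => if PySem.Str.endswith word s then some s else findSuffix word rest

def step4_alt (word : String) : String :=
  match findSuffix word pvSuffixesB with
  | some s =>
    let stem := PySem.Str.slice word none (some (-(PySem.Str.len s)))
    if pvMeasure stem > 1 then stem else word
  | none =>
    if PySem.Str.endswith word "ion" then
      let stem := PySem.Str.slice word none (some (-3))
      if stem ≠ "" ∧
          (PySem.Str.pyGet? stem (-1) = some 's' ∨ PySem.Str.pyGet? stem (-1) = some 't') ∧
          pvMeasure stem > 1
      then stem else word
    else word

-- ===== PRECONDITION & SPEC =====
def Spec_step4 (word : String) (out : String) : Prop := out = step4_alt word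
instance (word : String) (out : String) : Decidable (Spec_step4 word out) := by unfold Spec_step4; infer_instance

-- ===== CLAIM (what is proved, stated in full; the proofs are below) =====
def Claim_equal_step4 : Prop := ∀ (word : String), Dom_step4 word → Spec_step4 word (step4 word)

-- ===== LEMMAS AND PROOFS =====

-- the classification stream both measures walk: prevc = "previous letter classified consonant"
def classSeq : List Char → Bool → List Char
  | [], _ => []
  | c :: cs, prevc =>
    (if decide (c ∈ pvVowels) || (c == 'y' && prevc) then 'v' else 'c')
      :: classSeq cs (!(decide (c ∈ pvVowels) || (c == 'y' && prevc)))

lemma contains_vowels (c : Char) : PySem.Set.contains pvVowelsB c = decide (c ∈ pvVowels) := by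
  have h : (pvVowelsB : List Char) = pvVowels := by decide
  simp [PySem.Set.contains, h, pvVowels]

lemma cvc_go (cs : List Char) : ∀ acc : List Char,
    (PySem.List.enumerate cs (acc.length : Int)).foldl (fun cvc_str p =>
      if p.2 ∈ pvVowels then cvc_str ++ ['v']
      else if p.1 > 0 ∧ PySem.List.pyGet? cvc_str (p.1 - 1) = some 'c' ∧ p.2 = 'y' then
        cvc_str ++ ['v']
      else cvc_str ++ ['c']) acc
    = acc ++ classSeq cs (acc.getLast? == some 'c') := by
  induction cs with
  | nil => intro acc; simp [PySem.List.enumerate_nil, classSeq]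
  | cons c cs ih =>
    intro acc
    rw [PySem.List.enumerate_cons, List.foldl_cons]
    have hbody : (if c ∈ pvVowels then acc ++ ['v']
        else if ((acc.length : Int) > 0 ∧ PySem.List.pyGet? acc ((acc.length : Int) - 1) = some 'c' ∧ c = 'y') then acc ++ ['v']
        else acc ++ ['c'])
        = acc ++ [if (decide (c ∈ pvVowels) || (c == 'y' && (acc.getLast? == some 'c'))) then 'v' else 'c'] := by
      by_cases hc : c ∈ pvVowels
      · simp [hc]
      · rcases List.eq_nil_or_concat acc with rfl | ⟨ys, y, rfl⟩
        · simp [hc, PySem.List.pyGet?]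
        · have hcast : (((ys ++ [y]).length : Int) - 1) = ((ys.length : Nat) : Int) := by simp
          have hget : PySem.List.pyGet? (ys ++ [y]) (((ys ++ [y]).length : Int) - 1) = some y := by
            rw [hcast, PySem.List.pyGet?_natCast]
            exact List.getElem?_concat_length
          simp only [List.concat_eq_append, hget, List.getLast?_concat]
          by_cases hy : c = 'y' <;> by_cases hyc : y = 'c' <;> simp [hy, hyc, pvVowels] <;> split_ifs <;> rfl
    rw [hbody]
    have hlen : ((acc.length : Int) + 1) = (((acc ++ [(if (decide (c ∈ pvVowels) || (c == 'y' && (acc.getLast? == some 'c'))) then 'v' else 'c')]).length : Nat) : Int) := by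
      simp
    rw [hlen, ih]
    simp only [List.getLast?_concat, classSeq]
    by_cases hiv : (decide (c ∈ pvVowels) || (c == 'y' && (acc.getLast? == some 'c'))) = true <;>
      simp [hiv]

lemma cvc_pattern_eq (w : String) : cvc_pattern w = classSeq w.toList false := by
  have h := cvc_go w.toList []
  simpa [cvc_pattern] using h

lemma count_go (cs : List Char) : ∀ (g : Int) (flag vf prevc : Bool),
    (vf = true → flag = false) →
    ((classSeq cs prevc).foldl findLoop (g, flag, vf)).1
      = (cs.foldl pvMeasureLoop (g, prevc, vf)).1 := by
  induction cs with
  | nil => intros; rfl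
  | cons c cs ih =>
    intro g flag vf prevc hinv
    simp only [classSeq, List.foldl_cons]
    have hcond : (PySem.Set.contains pvVowelsB c || (c == 'y' && prevc))
        = (decide (c ∈ pvVowels) || (c == 'y' && prevc)) := by
      rw [contains_vowels]
    cases hv : (decide (c ∈ pvVowels) || (c == 'y' && prevc)) with
    | true =>
      have h2 : pvMeasureLoop (g, prevc, vf) c = (g, false, true) := by
        simp only [pvMeasureLoop]
        rw [hcond, hv]
        simp
      have h1 : findLoop (g, flag, vf) 'v' = (g, false, true) := by
        simp [findLoop]
      rw [if_pos rfl, h1, h2]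
      exact ih g false true false (fun _ => rfl)
    | false =>
      have h2 : pvMeasureLoop (g, prevc, vf) c = ((if vf then g + 1 else g), true, false) := by
        simp only [pvMeasureLoop]
        rw [hcond, hv]
        simp
      have h1 : findLoop (g, flag, vf) 'c' = ((if vf then g + 1 else g), flag, false) := by
        cases vf with
        | true => simp [findLoop, hinv rfl]
        | false => cases flag <;> simp [findLoop]
      rw [if_neg (by simp), h1, h2]
      exact ih (if vf then g + 1 else g) flag false true (by simp)

lemma find_eq_measure (w : String) : find w = pvMeasure w := by
  rw [find, pvMeasure, cvc_pattern_eq]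
  exact count_go w.toList 0 true false false (by simp)

lemma loop_eq (word : String) : ∀ l : List String,
    step4Go word l = (findSuffix word l).map (fun s =>
      let stem := PySem.Str.slice word none (some (-(PySem.Str.len s)))
      if pvMeasure stem > 1 then stem else word) := by
  intro l
  induction l with
  | nil => rfl
  | cons s rest ih =>
    simp only [step4Go, findSuffix, PySem.Str.endswith_eq]
    by_cases h : PySem.Chars.endswith word.toList s.toList = true
    · simp [h, find_eq_measure]
    · simp [h, ih]

-- ===== VERDICT (by name: the statement is the Claim_ definition above) =====
theorem step4_spec : Claim_equal_step4 := by
  intro word _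
  unfold Spec_step4 step4 step4_alt
  rw [show pvSuffixesB = pvSuffixes from rfl, loop_eq]
  cases h : findSuffix word pvSuffixes with
  | some s => simp
  | none =>
    simp only [Option.map_none, PySem.Str.endswith_eq]
    by_cases he : PySem.Chars.endswith word.toList "ion".toList = true
    · simp only [he, if_true]
      rw [show (PySem.Str.len "ion") = 3 from rfl, find_eq_measure]
      set stem := PySem.Str.slice word none (some (-3)) with hs
      by_cases hne : stem = ""
      · rw [hne]
        norm_num [pvMeasure]
      · have : (pvMeasure stem > 1 ∧
            (PySem.Str.pyGet? stem (-1) = some 's' ∨ PySem.Str.pyGet? stem (-1) = some 't')) ↔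
            (stem ≠ "" ∧
            (PySem.Str.pyGet? stem (-1) = some 's' ∨ PySem.Str.pyGet? stem (-1) = some 't') ∧
            pvMeasure stem > 1) := by
          constructor
          · rintro ⟨h1, h2⟩; exact ⟨hne, h2, h1⟩
          · rintro ⟨_, h2, h1⟩; exact ⟨h1, h2⟩
        simp only [this]
    · rw [if_neg he, if_neg he]
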